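-- pv_equiv track=rewrite | github.com/generalaimodels/TrainScale | data_pipeline/preprocessing/prompt_engine.py | mask_ranges
-- ===== SOURCE A (Python) =====
-- from typing import (
--     Any,
--     Callable,
--     Dict,
--     FrozenSet,
--     List,
--     Literal,
--     Optional,
--     Sequence,
--     Tuple,
--     Union,
--     TYPE_CHECKING,
-- )
--
-- LABEL_PAD_TOKEN_ID: int = -100
--
-- def mask_ranges(
--     input_ids: List[int],
--     attention_mask: List[int],
--     masked_ranges: List[Tuple[int, int]],
-- ) -> List[int]:
--     """
--     Mask arbitrary ``[start, end)`` ranges — used for multi-turn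
--     per-role masking where non-contiguous assistant turns must be
--     unmasked while everything else is masked.
--
--     Tokens *outside* every masked range keep their original ID;
--     tokens *inside* any range (or on padding) get ``LABEL_PAD_TOKEN_ID``.
--     """
--     n = len(input_ids)
--     # Start with all tokens as labels, then carve out masked regions.
--     labels: List[int] = list(input_ids)
--     for start, end in masked_ranges:
--         clamped_start = max(0, start)
--         clamped_end = min(end, n)
--         for i in range(clamped_start, clamped_end):
--             labels[i] = LABEL_PAD_TOKEN_ID
--     # Always mask padding positions.
--     for i in range(n):
--         if attention_mask[i] == 0:
--             labels[i] = LABEL_PAD_TOKEN_ID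
--     return labels
-- ===== SOURCE B (Python) =====
-- LABEL_PAD_TOKEN_ID: int = -100
--
-- def mask_ranges(input_ids, attention_mask, masked_ranges):
--     # Sweep-line coverage: accumulate all ranges into a difference array once
--     # (O(k)), then a single pass with a running coverage depth decides every
--     # label; no per-range element enumeration, no buffer mutation.
--     n = len(input_ids)
--     diff = [0] * (n + 1)
--     for s, e in masked_ranges:
--         s2 = max(0, min(s, n))
--         e2 = max(0, min(e, n))
--         if s2 < e2:
--             diff[s2] += 1
--             diff[e2] -= 1
--     labels = []
--     depth = 0
--     for i, tok in enumerate(input_ids):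
--         depth += diff[i]
--         labels.append(LABEL_PAD_TOKEN_ID if depth > 0 or attention_mask[i] == 0 else tok)
--     return labels
-- ===== Notes on version B (the rewrite author's own statement) =====
-- stated objective: alternative
-- what changed: Replaced A's per-range index writes into a copied label buffer plus a second padding pass by a sweep-line difference array (one +1/-1 pair per clamped range) and a single pass with a running coverage depth deciding each label, so range lengths are never enumerated.
import Mathlib
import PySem

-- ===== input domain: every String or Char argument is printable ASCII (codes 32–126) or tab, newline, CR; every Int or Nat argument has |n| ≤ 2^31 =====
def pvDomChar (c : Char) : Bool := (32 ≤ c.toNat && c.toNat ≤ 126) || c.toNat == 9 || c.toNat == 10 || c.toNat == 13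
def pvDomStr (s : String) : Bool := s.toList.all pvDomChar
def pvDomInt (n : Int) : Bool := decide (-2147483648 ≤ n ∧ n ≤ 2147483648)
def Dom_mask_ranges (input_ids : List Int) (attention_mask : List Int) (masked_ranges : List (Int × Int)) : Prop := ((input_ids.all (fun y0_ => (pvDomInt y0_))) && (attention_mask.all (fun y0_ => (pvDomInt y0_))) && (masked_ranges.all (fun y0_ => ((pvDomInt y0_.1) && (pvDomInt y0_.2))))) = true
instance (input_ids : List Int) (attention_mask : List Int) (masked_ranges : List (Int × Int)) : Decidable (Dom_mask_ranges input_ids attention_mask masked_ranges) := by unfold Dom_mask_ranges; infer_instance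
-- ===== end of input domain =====

-- B replaces A's per-range index writes into a copied label buffer (plus a second
-- padding pass) by a sweep-line difference array and one pass with a running
-- coverage depth; objective: alternative.

-- ===== PORT A =====
def mask_ranges (input_ids : List Int) (attention_mask : List Int) (masked_ranges : List (Int × Int)) : List Int :=
  let n : Int := input_ids.length
  let labels : List Int := masked_ranges.foldl
    (fun labels se =>
      (PySem.List.pyRange (max 0 se.1) (min se.2 n) 1).foldl
        (fun l i => PySem.List.pySetD l i (-100)) labels)
    input_ids
  (PySem.List.pyRange 0 n 1).foldl
    (fun l i => if PySem.List.pyGetD attention_mask i 0 == 0 then PySem.List.pySetD l i (-100) else l)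
    labels

-- ===== PORT B =====
def mask_ranges_alt (input_ids : List Int) (attention_mask : List Int) (masked_ranges : List (Int × Int)) : List Int :=
  let n : Int := input_ids.length
  let diff : List Int := masked_ranges.foldl
    (fun diff se =>
      let s2 := max 0 (min se.1 n)
      let e2 := max 0 (min se.2 n)
      if s2 < e2 then
        let d1 := PySem.List.pySetD diff s2 (PySem.List.pyGetD diff s2 0 + 1)
        PySem.List.pySetD d1 e2 (PySem.List.pyGetD d1 e2 0 - 1)
      else diff)
    (List.replicate (n.toNat + 1) 0)
  ((PySem.List.enumerate input_ids 0).foldl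
    (fun st p =>
      let depth := st.1 + PySem.List.pyGetD diff p.1 0
      (depth, st.2 ++ [if depth > 0 || PySem.List.pyGetD attention_mask p.1 0 == 0 then (-100 : Int) else p.2]))
    ((0 : Int), ([] : List Int))).2

-- ===== PRECONDITION & SPEC =====
-- Pre_ excludes exactly the inputs where Python A raises IndexError:
-- attention_mask shorter than input_ids (attention_mask[i] for i < len(input_ids)).
def Pre_mask_ranges (input_ids : List Int) (attention_mask : List Int) (masked_ranges : List (Int × Int)) : Prop :=
  input_ids.length ≤ attention_mask.length
instance (input_ids : List Int) (attention_mask : List Int) (masked_ranges : List (Int × Int)) : Decidable (Pre_mask_ranges input_ids attention_mask masked_ranges) := by unfold Pre_mask_ranges; infer_instance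
def pvWitness_mask_ranges : List Int × List Int × (List (Int × Int)) := ([5, 6, 7], [1, 0, 1], [(1, 2)])

def Spec_mask_ranges (input_ids : List Int) (attention_mask : List Int) (masked_ranges : List (Int × Int)) (out : List Int) : Prop := out = mask_ranges_alt input_ids attention_mask masked_ranges
instance (input_ids : List Int) (attention_mask : List Int) (masked_ranges : List (Int × Int)) (out : List Int) : Decidable (Spec_mask_ranges input_ids attention_mask masked_ranges out) := by unfold Spec_mask_ranges; infer_instance

-- ===== CLAIM (what is proved, stated in full; the proofs are below) =====
def Claim_equal_mask_ranges : Prop := ∀ (input_ids : List Int) (attention_mask : List Int) (masked_ranges : List (Int × Int)), Dom_mask_ranges input_ids attention_mask masked_ranges → Pre_mask_ranges input_ids attention_mask masked_ranges → Spec_mask_ranges input_ids attention_mask masked_ranges (mask_ranges input_ids attention_mask masked_ranges)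

-- ===== LEMMAS AND PROOFS =====

-- length is preserved by any foldl of pySetD writes
theorem pvFillLen (is : List Int) (v : Int) (labels : List Int) :
    (is.foldl (fun l i => PySem.List.pySetD l i v) labels).length = labels.length := by
  induction is generalizing labels with
  | nil => rfl
  | cons i is ih => simp [List.foldl, ih, PySem.List.length_pySetD]

-- pointwise value of a set at a nonnegative Int index
theorem pvSetGet (labels : List Int) (a : Int) (v : Int) (ha : 0 ≤ a) (j : Nat) :
    (PySem.List.pySetD labels a v).getD j 0
      = if (j : Int) = a ∧ j < labels.length then v else labels.getD j 0 := by
  rw [PySem.List.pySetD_of_nonneg labels v ha]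
  simp only [List.getD_eq_getElem?_getD, List.getElem?_set]
  split_ifs <;> simp_all <;> omega

-- pointwise value of a single range fill
theorem pvFillGet (a b v : Int) (ha : 0 ≤ a) (labels : List Int) (j : Nat) :
    (((PySem.List.pyRange a b 1).foldl (fun l i => PySem.List.pySetD l i v) labels).getD j 0)
      = if a ≤ (j : Int) ∧ (j : Int) < b ∧ j < labels.length then v else labels.getD j 0 := by
  by_cases hab : b ≤ a
  · rw [PySem.List.pyRange_one_eq_nil hab]
    simp only [List.foldl]
    rw [if_neg (by omega)]
  · have hab' : a < b := by omega
    rw [PySem.List.pyRange_one_cons hab']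
    simp only [List.foldl]
    have hd : b - (a+1) < b - a := by omega
    rw [pvFillGet (a+1) b v (by omega) (PySem.List.pySetD labels a v) j,
        PySem.List.length_pySetD, pvSetGet labels a v ha j]
    split_ifs <;> first | rfl | omega
termination_by (b - a).toNat
decreasing_by all_goals omega

-- pointwise value of the whole range-fill pass (fold over the ranges list)
theorem pvRangesGet (rs : List (Int × Int)) (n : Int) (labels : List Int) (j : Nat)
    (hn : (labels.length : Int) ≤ n) :
    ((rs.foldl (fun labels se =>
        (PySem.List.pyRange (max 0 se.1) (min se.2 n) 1).foldl
          (fun l i => PySem.List.pySetD l i (-100)) labels) labels).getD j 0)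
      = if (rs.any (fun se => se.1 ≤ (j : Int) && (j : Int) < se.2)) = true ∧ j < labels.length
        then -100 else labels.getD j 0 := by
  induction rs generalizing labels with
  | nil => simp
  | cons r rs ih =>
    simp only [List.foldl, List.any_cons]
    rw [ih _ (by rw [pvFillLen]; exact hn), pvFillLen,
        pvFillGet _ _ _ (by omega)]
    by_cases hjl : j < labels.length
    · by_cases hA : (rs.any (fun se => se.1 ≤ (j : Int) && (j : Int) < se.2)) = true
      · rw [if_pos ⟨hA, hjl⟩,
            if_pos ⟨by rw [Bool.or_eq_true]; exact Or.inr hA, hjl⟩]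
      · rw [if_neg (fun h => hA h.1)]
        by_cases hr : r.1 ≤ (j : Int) ∧ (j : Int) < r.2
        · rw [if_pos ⟨by omega, by omega, hjl⟩,
              if_pos ⟨by rw [Bool.or_eq_true]; exact Or.inl (by simp [hr.1, hr.2]), hjl⟩]
        · rw [if_neg (fun h => hr ⟨by omega, by omega⟩),
              if_neg (fun h => by
                rcases (Bool.or_eq_true _ _ ▸ h.1 : _ ∨ _) with h' | h'
                · exact hr (by simpa using h')
                · exact hA h')]
    · rw [if_neg (fun h => hjl h.2), if_neg (fun h => hjl h.2.2),
          if_neg (fun h => hjl h.2)]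

-- length of the range-fill pass
theorem pvRangesLen (rs : List (Int × Int)) (n : Int) (labels : List Int) :
    (rs.foldl (fun labels se =>
        (PySem.List.pyRange (max 0 se.1) (min se.2 n) 1).foldl
          (fun l i => PySem.List.pySetD l i (-100)) labels) labels).length = labels.length := by
  induction rs generalizing labels with
  | nil => rfl
  | cons r rs ih => simp only [List.foldl]; rw [ih, pvFillLen]

-- length of the padding pass
theorem pvPadLen (is : List Int) (am : List Int) (labels : List Int) :
    (is.foldl (fun l i => if PySem.List.pyGetD am i 0 == 0 then PySem.List.pySetD l i (-100) else l)
        labels).length = labels.length := by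
  induction is generalizing labels with
  | nil => rfl
  | cons i is ih =>
    simp only [List.foldl]
    split_ifs <;> rw [ih] <;> simp [PySem.List.length_pySetD]

-- pointwise value of the padding pass
theorem pvPadGet (a b : Int) (ha : 0 ≤ a) (am labels : List Int) (j : Nat) :
    (((PySem.List.pyRange a b 1).foldl
        (fun l i => if PySem.List.pyGetD am i 0 == 0 then PySem.List.pySetD l i (-100) else l)
        labels).getD j 0)
      = if a ≤ (j : Int) ∧ (j : Int) < b ∧ j < labels.length ∧
           PySem.List.pyGetD am (j : Int) 0 == 0
        then -100 else labels.getD j 0 := by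
  by_cases hab : b ≤ a
  · rw [PySem.List.pyRange_one_eq_nil hab]
    simp only [List.foldl]
    rw [if_neg (by omega)]
  · have hab' : a < b := by omega
    rw [PySem.List.pyRange_one_cons hab']
    simp only [List.foldl]
    have hd : b - (a+1) < b - a := by omega
    by_cases hc : PySem.List.pyGetD am a 0 == 0
    · rw [if_pos hc]
      rw [pvPadGet (a+1) b (by omega) am _ j, PySem.List.length_pySetD,
          pvSetGet labels a (-100) ha j]
      by_cases hja : (j : Int) = a
      · have hcj : PySem.List.pyGetD am (j : Int) 0 == 0 := by rw [hja]; exact hc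
        by_cases hjl : j < labels.length
        · rw [if_neg (fun h => absurd h.1 (by omega)), if_pos ⟨hja, hjl⟩,
              if_pos ⟨by omega, by omega, hjl, hcj⟩]
        · rw [if_neg (fun h => hjl h.2.2.1), if_neg (fun h => hjl h.2),
              if_neg (fun h => hjl h.2.2.1)]
      · by_cases hp : PySem.List.pyGetD am (j : Int) 0 == 0
        · by_cases hq : a + 1 ≤ (j : Int) ∧ (j : Int) < b ∧ j < labels.length
          · rw [if_pos ⟨hq.1, hq.2.1, hq.2.2, hp⟩,
                if_pos ⟨by omega, hq.2.1, hq.2.2, hp⟩]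
          · rw [if_neg (fun h => hq ⟨h.1, h.2.1, h.2.2.1⟩),
                if_neg (fun h => hja h.1),
                if_neg (fun h => hq ⟨by omega, h.2.1, h.2.2.1⟩)]
        · rw [if_neg (fun h => hp h.2.2.2), if_neg (fun h => hja h.1),
              if_neg (fun h => hp h.2.2.2)]
    · rw [if_neg hc]
      rw [pvPadGet (a+1) b (by omega) am labels j]
      by_cases hja : (j : Int) = a
      · have hcj : ¬ (PySem.List.pyGetD am (j : Int) 0 == 0 : Prop) := by
          rw [hja]; exact hc
        rw [if_neg (by omega), if_neg (fun h => hcj h.2.2.2)]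
      · by_cases hp : PySem.List.pyGetD am (j : Int) 0 == 0
        · by_cases hq : a + 1 ≤ (j : Int) ∧ (j : Int) < b ∧ j < labels.length
          · rw [if_pos ⟨hq.1, hq.2.1, hq.2.2, hp⟩,
                if_pos ⟨by omega, hq.2.1, hq.2.2, hp⟩]
          · rw [if_neg (fun h => hq ⟨h.1, h.2.1, h.2.2.1⟩),
                if_neg (fun h => hq ⟨by omega, h.2.1, h.2.2.1⟩)]
        · rw [if_neg (fun h => hp h.2.2.2), if_neg (fun h => hp h.2.2.2)]
termination_by (b - a).toNat
decreasing_by all_goals omega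

-- B SIDE ------------------------------------------------------------------

-- changing one in-range cell shifts the prefix sum by the written delta
theorem pvSumSet (d : List Int) (a w : Int) (ha : 0 ≤ a) (hal : a < (d.length : Int)) (j : Int)
    (hj : j < (d.length : Int)) :
    ((PySem.List.pyRange 0 (j+1) 1).map
        (fun i => PySem.List.pyGetD (PySem.List.pySetD d a w) i 0)).sum
      = ((PySem.List.pyRange 0 (j+1) 1).map (fun i => PySem.List.pyGetD d i 0)).sum
        + (if a ≤ j then w - PySem.List.pyGetD d a 0 else 0) := by
  by_cases haj : a ≤ j
  · rw [if_pos haj,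
        PySem.List.pyRange_one_append 0 a (j+1) ha (by omega),
        PySem.List.pyRange_one_cons (show a < j+1 by omega)]
    simp only [List.map_append, List.map_cons, List.sum_append, List.sum_cons]
    have hside : ∀ i : Int, 0 ≤ i → i < (d.length : Int) → i ≠ a →
        PySem.List.pyGetD (PySem.List.pySetD d a w) i 0 = PySem.List.pyGetD d i 0 := by
      intro i hi0 hil hia
      rw [PySem.List.pySetD_of_nonneg d w ha,
          PySem.List.pyGetD_eq_getElem _ _ hi0 (by simp only [List.length_set]; omega),
          PySem.List.pyGetD_eq_getElem _ _ hi0 (by omega),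
          List.getElem_set_ne (by omega)]
    have h1 : (PySem.List.pyRange 0 a 1).map
          (fun i => PySem.List.pyGetD (PySem.List.pySetD d a w) i 0)
        = (PySem.List.pyRange 0 a 1).map (fun i => PySem.List.pyGetD d i 0) := by
      apply List.map_congr_left
      intro i hi
      rw [PySem.List.mem_pyRange_one] at hi
      exact hside i hi.1 (by omega) (by omega)
    have h2 : (PySem.List.pyRange (a+1) (j+1) 1).map
          (fun i => PySem.List.pyGetD (PySem.List.pySetD d a w) i 0)
        = (PySem.List.pyRange (a+1) (j+1) 1).map (fun i => PySem.List.pyGetD d i 0) := by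
      apply List.map_congr_left
      intro i hi
      rw [PySem.List.mem_pyRange_one] at hi
      exact hside i (by omega) (by omega) (by omega)
    have hmid : PySem.List.pyGetD (PySem.List.pySetD d a w) a 0 = w := by
      rw [PySem.List.pySetD_of_nonneg d w ha,
          PySem.List.pyGetD_eq_getElem _ _ ha (by simpa using hal),
          List.getElem_set_self]
    rw [h1, h2, hmid]
    ring
  · rw [if_neg haj]
    have h1 : (PySem.List.pyRange 0 (j+1) 1).map
          (fun i => PySem.List.pyGetD (PySem.List.pySetD d a w) i 0)
        = (PySem.List.pyRange 0 (j+1) 1).map (fun i => PySem.List.pyGetD d i 0) := by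
      apply List.map_congr_left
      intro i hi
      rw [PySem.List.mem_pyRange_one] at hi
      rw [PySem.List.pySetD_of_nonneg d w ha,
          PySem.List.pyGetD_eq_getElem _ _ hi.1 (by simp only [List.length_set]; omega),
          PySem.List.pyGetD_eq_getElem _ _ hi.1 (by omega),
          List.getElem_set_ne (by omega)]
    rw [h1, add_zero]

-- prefix sums of the built difference array count the ranges covering j
theorem pvPrefix (rs : List (Int × Int)) (n : Int) (d : List Int)
    (hd : (d.length : Int) = n + 1) (j : Int) (hj0 : 0 ≤ j) (hjn : j ≤ n) :
    ((PySem.List.pyRange 0 (j+1) 1).map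
        (fun i => PySem.List.pyGetD
          (rs.foldl
            (fun diff se =>
              let s2 := max 0 (min se.1 n)
              let e2 := max 0 (min se.2 n)
              if s2 < e2 then
                let d1 := PySem.List.pySetD diff s2 (PySem.List.pyGetD diff s2 0 + 1)
                PySem.List.pySetD d1 e2 (PySem.List.pyGetD d1 e2 0 - 1)
              else diff) d) i 0)).sum
      = ((PySem.List.pyRange 0 (j+1) 1).map (fun i => PySem.List.pyGetD d i 0)).sum
        + (rs.countP (fun se =>
            decide (max 0 (min se.1 n) ≤ j ∧ j < max 0 (min se.2 n))) : Int) := by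
  induction rs generalizing d with
  | nil => simp
  | cons r rs ih =>
    simp only [List.foldl, List.countP_cons]
    set s2 := max 0 (min r.1 n) with hs2
    set e2 := max 0 (min r.2 n) with he2
    have hs20 : 0 ≤ s2 := by omega
    have he20 : 0 ≤ e2 := by omega
    have hs2n : s2 ≤ n := by
      have : min r.1 n ≤ n := min_le_right _ _
      omega
    have he2n : e2 ≤ n := by
      have : min r.2 n ≤ n := min_le_right _ _
      omega
    by_cases hse : s2 < e2
    · rw [if_pos hse]
      have hlen1 : (PySem.List.pySetD d s2 (PySem.List.pyGetD d s2 0 + 1)).length = d.length :=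
        PySem.List.length_pySetD _ _ _
      rw [ih _ (by simpa [PySem.List.length_pySetD] using hd)]
      rw [pvSumSet _ e2 _ he20 (by simp [PySem.List.length_pySetD]; omega) j
            (by simp [PySem.List.length_pySetD]; omega)]
      rw [pvSumSet d s2 _ hs20 (by omega) j (by omega)]
      simp only [decide_eq_true_eq]
      split_ifs <;> push_cast <;> omega
    · rw [if_neg hse, ih _ hd]
      have : ¬ (s2 ≤ j ∧ j < e2) := by omega
      simp [this]

-- the sweep fold writes, per position, the running-depth decision
theorem pvSweep (diff am : List Int) (xs : List Int) (s d : Int) (acc : List Int) :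
    ((PySem.List.enumerate xs s).foldl
      (fun st p =>
        let depth := st.1 + PySem.List.pyGetD diff p.1 0
        (depth, st.2 ++ [if depth > 0 || PySem.List.pyGetD am p.1 0 == 0 then (-100 : Int) else p.2]))
      (d, acc)).2
    = acc ++ (PySem.List.enumerate xs s).map (fun p =>
        if (d + ((PySem.List.pyRange s (p.1+1) 1).map
              (fun i => PySem.List.pyGetD diff i 0)).sum) > 0
           || PySem.List.pyGetD am p.1 0 == 0 then (-100 : Int) else p.2) := by
  induction xs generalizing s d acc with
  | nil => simp [PySem.List.enumerate_nil]
  | cons x xs ih =>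
    rw [PySem.List.enumerate_cons]
    simp only [List.foldl, List.map_cons]
    rw [ih]
    have hhead : (PySem.List.pyRange s (s+1) 1).map
        (fun i => PySem.List.pyGetD diff i 0) = [PySem.List.pyGetD diff s 0] := by
      rw [PySem.List.pyRange_one_singleton]; rfl
    have htail : (PySem.List.enumerate xs (s+1)).map (fun p =>
          if (d + PySem.List.pyGetD diff s 0
              + ((PySem.List.pyRange (s+1) (p.1+1) 1).map
                  (fun i => PySem.List.pyGetD diff i 0)).sum) > 0
             || PySem.List.pyGetD am p.1 0 == 0 then (-100 : Int) else p.2)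
        = (PySem.List.enumerate xs (s+1)).map (fun p =>
          if (d + ((PySem.List.pyRange s (p.1+1) 1).map
                (fun i => PySem.List.pyGetD diff i 0)).sum) > 0
             || PySem.List.pyGetD am p.1 0 == 0 then (-100 : Int) else p.2) := by
      apply List.map_congr_left
      intro p hp
      rw [PySem.List.mem_enumerate_iff] at hp
      obtain ⟨k, hk, rfl⟩ := hp
      have hsplit : PySem.List.pyRange s (s + 1 + (k : Int) + 1) 1
          = PySem.List.pyRange s (s+1) 1 ++ PySem.List.pyRange (s+1) (s + 1 + (k : Int) + 1) 1 :=
        PySem.List.pyRange_one_append s (s+1) _ (by omega) (by omega)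
      simp only [hsplit, List.map_append, List.sum_append, hhead, List.sum_cons, List.sum_nil]
      ring_nf
    rw [htail, hhead]
    simp only [List.sum_cons, List.sum_nil, add_zero, List.append_assoc, List.cons_append,
      List.nil_append]

-- length of B's output
theorem pvAltLen (input_ids am : List Int) (rs : List (Int × Int)) :
    (mask_ranges_alt input_ids am rs).length = input_ids.length := by
  unfold mask_ranges_alt
  simp only []
  rw [pvSweep]
  simp [PySem.List.length_enumerate]

-- pointwise value of B's output
theorem pvAltGet (input_ids am : List Int) (rs : List (Int × Int)) (j : Nat)
    (hj : j < input_ids.length) :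
    (mask_ranges_alt input_ids am rs).getD j 0
      = if ((rs.countP (fun se =>
              decide (max 0 (min se.1 (input_ids.length : Int)) ≤ (j : Int)
                ∧ (j : Int) < max 0 (min se.2 (input_ids.length : Int)))) : Int) > 0
           || PySem.List.pyGetD am (j : Int) 0 == 0) = true
        then (-100 : Int) else input_ids.getD j 0 := by
  unfold mask_ranges_alt
  simp only []
  rw [pvSweep]
  have hjl : j < (PySem.List.enumerate input_ids 0).length := by
    rw [PySem.List.length_enumerate]; exact hj
  rw [List.nil_append, List.getD_eq_getElem?_getD, List.getElem?_map,
      List.getElem?_eq_getElem hjl, PySem.List.getElem_enumerate]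
  simp only [Option.map_some, Option.getD_some, zero_add]
  have hbase : ((PySem.List.pyRange 0 ((j : Int)+1) 1).map
      (fun i => PySem.List.pyGetD
        (List.replicate ((input_ids.length : Int).toNat + 1) (0 : Int)) i 0)).sum = 0 := by
    have : (PySem.List.pyRange 0 ((j : Int)+1) 1).map
        (fun i => PySem.List.pyGetD
          (List.replicate ((input_ids.length : Int).toNat + 1) (0 : Int)) i 0)
        = (PySem.List.pyRange 0 ((j : Int)+1) 1).map (fun _ => (0 : Int)) := by
      apply List.map_congr_left
      intro i hi
      rw [PySem.List.mem_pyRange_one] at hi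
      rw [PySem.List.pyGetD_eq_getElem _ _ hi.1
          (by simp only [List.length_replicate]; omega)]
      simp
    rw [this]
    simp
  rw [pvPrefix rs (input_ids.length : Int) _
      (by simp only [List.length_replicate]; push_cast; omega) (j : Int) (by omega) (by omega),
    hbase, zero_add]
  rw [List.getD_eq_getElem?_getD, List.getElem?_eq_getElem hj]
  rfl

-- ===== VERDICT (by name: the statement is the Claim_ definition above) =====
theorem mask_ranges_spec : Claim_equal_mask_ranges := by
  intro input_ids am rs _hdom _hpre
  unfold Spec_mask_ranges
  unfold mask_ranges
  simp only []
  have hLA := pvRangesLen rs (input_ids.length : Int) input_ids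
  apply List.ext_getElem
  · rw [pvPadLen, hLA, pvAltLen]
  · intro j hj1 hj2
    have hjn : j < input_ids.length := by rwa [pvPadLen, hLA] at hj1
    rw [← List.getD_eq_getElem _ 0, ← List.getD_eq_getElem _ 0]
    rw [pvPadGet 0 (input_ids.length : Int) (by omega) am _ j]
    rw [hLA, pvRangesGet rs (input_ids.length : Int) input_ids j (by omega)]
    rw [pvAltGet input_ids am rs j hjn]
    have hiff : ((rs.countP (fun se =>
          decide (max 0 (min se.1 (input_ids.length : Int)) ≤ (j : Int)
            ∧ (j : Int) < max 0 (min se.2 (input_ids.length : Int)))) : Int) > 0)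
        ↔ (rs.any (fun se => se.1 ≤ (j : Int) && (j : Int) < se.2)) = true := by
      rw [List.any_eq_true]
      constructor
      · intro h
        have : 0 < rs.countP (fun se =>
            decide (max 0 (min se.1 (input_ids.length : Int)) ≤ (j : Int)
              ∧ (j : Int) < max 0 (min se.2 (input_ids.length : Int)))) := by exact_mod_cast h
        rw [List.countP_pos_iff] at this
        obtain ⟨se, hse, hcond⟩ := this
        simp only [decide_eq_true_eq] at hcond
        refine ⟨se, hse, ?_⟩
        simp only [Bool.and_eq_true, decide_eq_true_eq]
        omega
      · rintro ⟨se, hse, hcond⟩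
        simp only [Bool.and_eq_true, decide_eq_true_eq] at hcond
        have : 0 < rs.countP (fun se =>
            decide (max 0 (min se.1 (input_ids.length : Int)) ≤ (j : Int)
              ∧ (j : Int) < max 0 (min se.2 (input_ids.length : Int)))) := by
          rw [List.countP_pos_iff]
          exact ⟨se, hse, by simp only [decide_eq_true_eq]; omega⟩
        exact_mod_cast this
    by_cases hpad : PySem.List.pyGetD am (j : Int) 0 == 0
    · rw [if_pos ⟨by omega, by omega, hjn, hpad⟩,
          if_pos (by rw [Bool.or_eq_true]; exact Or.inr hpad)]
    · rw [if_neg (fun h => hpad h.2.2.2)]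
      by_cases hcov : (rs.any (fun se => se.1 ≤ (j : Int) && (j : Int) < se.2)) = true
      · rw [if_pos ⟨hcov, hjn⟩,
            if_pos (by rw [Bool.or_eq_true]
                       exact Or.inl (by exact decide_eq_true (hiff.mpr hcov)))]
      · rw [if_neg (fun h => hcov h.1),
            if_neg (fun h => by
              rcases (Bool.or_eq_true _ _ ▸ h : _ ∨ _) with h' | h'
              · exact hcov (hiff.mp (of_decide_eq_true h'))
              · exact hpad h')]
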